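-- pv_equiv track=rewrite | github.com/abhatkar1/Hello-World | Ch6_29.py | sumOfDoubleEvenPlace
-- ===== SOURCE A (Python) =====
-- def sumOfDoubleEvenPlace(number):
--     sum = 0
--     position = 0
--     while number > 0:
--         position += 1
--         if position % 2 == 0:
--             sum += getDigit(2 * (number % 10))
--         number //= 10
--     return sum
--
-- def getDigit(number):
--     digit = 0
--     if number // 10 <= 0:
--         digit = number
--     else:
--         digit += (number % 10) + (number // 10)
--     return digit
-- ===== SOURCE B (Python) =====
-- def sumOfDoubleEvenPlace(number):
--     if number <= 0:
--         return 0
--     d = 2 * ((number // 10) % 10)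
--     return d // 10 + d % 10 + sumOfDoubleEvenPlace(number // 100)
-- ===== Notes on version B (the rewrite author's own statement) =====
-- stated objective: simpler
-- what changed: Replaced A's while loop with a position counter, parity branch and getDigit helper by a direct recursion that consumes two digits per step, taking the next even-place digit directly and inlining its doubled digit sum.
import Mathlib
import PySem

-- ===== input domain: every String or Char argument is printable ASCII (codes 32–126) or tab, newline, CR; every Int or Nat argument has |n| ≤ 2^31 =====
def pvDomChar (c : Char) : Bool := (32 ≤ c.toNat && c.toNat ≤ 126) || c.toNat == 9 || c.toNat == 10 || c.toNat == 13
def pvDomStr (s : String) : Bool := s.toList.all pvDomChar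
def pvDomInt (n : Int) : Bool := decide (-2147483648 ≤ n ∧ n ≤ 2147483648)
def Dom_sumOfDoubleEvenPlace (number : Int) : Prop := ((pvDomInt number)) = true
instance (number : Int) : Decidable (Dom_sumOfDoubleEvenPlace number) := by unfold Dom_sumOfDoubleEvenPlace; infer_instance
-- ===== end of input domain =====

-- B replaces A's while loop + position counter + getDigit helper by a recursion
-- taking two digits per step; equal on all inputs (objective: simpler).

-- ===== PORT A =====
-- helper getDigit, transliterated
def pvGetDigit (number : Int) : Int :=
  if PySem.Int.floordiv number 10 ≤ 0 then number
  else 0 + (PySem.Int.mod number 10 + PySem.Int.floordiv number 10)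

-- the while loop of A, with its state (sum, position)
def pvA_loop (number sum position : Int) : Int :=
  if _h : number > 0 then
    let position' := position + 1
    let sum' := if PySem.Int.mod position' 2 = 0
                then sum + pvGetDigit (2 * PySem.Int.mod number 10) else sum
    pvA_loop (PySem.Int.floordiv number 10) sum' position'
  else sum
termination_by number.toNat
decreasing_by
  rw [PySem.Int.floordiv_eq_ediv_of_pos (by norm_num : (0:Int) < 10)]
  omega

def sumOfDoubleEvenPlace (number : Int) : Int := pvA_loop number 0 0

-- ===== PORT B =====
def sumOfDoubleEvenPlace_alt (number : Int) : Int :=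
  if _h : number ≤ 0 then 0
  else
    let d := 2 * PySem.Int.mod (PySem.Int.floordiv number 10) 10
    PySem.Int.floordiv d 10 + PySem.Int.mod d 10 +
      sumOfDoubleEvenPlace_alt (PySem.Int.floordiv number 100)
termination_by number.toNat
decreasing_by
  rw [PySem.Int.floordiv_eq_ediv_of_pos (by norm_num : (0:Int) < 100)]
  omega

-- ===== PRECONDITION & SPEC =====
def Spec_sumOfDoubleEvenPlace (number : Int) (out : Int) : Prop := out = sumOfDoubleEvenPlace_alt number
instance (number : Int) (out : Int) : Decidable (Spec_sumOfDoubleEvenPlace number out) := by unfold Spec_sumOfDoubleEvenPlace; infer_instance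

-- ===== CLAIM (what is proved, stated in full; the proofs are below) =====
def Claim_equal_sumOfDoubleEvenPlace : Prop := ∀ (number : Int), Dom_sumOfDoubleEvenPlace number → Spec_sumOfDoubleEvenPlace number (sumOfDoubleEvenPlace number)

-- ===== LEMMAS AND PROOFS =====

-- value of the loop when entered at ODD parity (current digit gets doubled)
def pvO (n : Int) : Int :=
  if n > 0 then pvGetDigit (2 * PySem.Int.mod n 10) + sumOfDoubleEvenPlace_alt (PySem.Int.floordiv n 10)
  else 0

-- floordiv/mod with positive literal divisors, specialised
lemma pv_fd (a b : Int) (hb : 0 < b) : PySem.Int.floordiv a b = a / b :=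
  PySem.Int.floordiv_eq_ediv_of_pos hb
lemma pv_md (a b : Int) (hb : 0 < b) : PySem.Int.mod a b = a % b :=
  PySem.Int.mod_eq_emod_of_pos hb

-- getDigit(2*t) is the inlined digit sum, for any single digit t
lemma pv_getDigit_eq (t : Int) (h0 : 0 ≤ t) (h9 : t < 10) :
    pvGetDigit (2 * t) = 2 * t / 10 + 2 * t % 10 := by
  unfold pvGetDigit
  rw [pv_fd _ _ (by norm_num), pv_md _ _ (by norm_num)]
  split_ifs with h
  · omega
  · omega

-- explicit unfolding equations
lemma pvA_loop_pos (n s p : Int) (h : n > 0) :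
    pvA_loop n s p = pvA_loop (n / 10)
      (if PySem.Int.mod (p + 1) 2 = 0 then s + pvGetDigit (2 * (n % 10)) else s)
      (p + 1) := by
  rw [pvA_loop]
  rw [pv_fd _ _ (by norm_num), pv_md _ _ (by norm_num)]
  simp [h]

lemma pvA_loop_nonpos (n s p : Int) (h : ¬ n > 0) : pvA_loop n s p = s := by
  rw [pvA_loop]; simp [h]

lemma pvAlt_nonpos (n : Int) (h : n ≤ 0) : sumOfDoubleEvenPlace_alt n = 0 := by
  rw [sumOfDoubleEvenPlace_alt]; simp [h]

lemma pvAlt_pos (n : Int) (h : ¬ n ≤ 0) :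
    sumOfDoubleEvenPlace_alt n =
      2 * (n / 10 % 10) / 10 + 2 * (n / 10 % 10) % 10 +
      sumOfDoubleEvenPlace_alt (n / 100) := by
  have e10 : ∀ a : Int, PySem.Int.floordiv a 10 = a / 10 := fun a => pv_fd a 10 (by norm_num)
  have m10 : ∀ a : Int, PySem.Int.mod a 10 = a % 10 := fun a => pv_md a 10 (by norm_num)
  have e100 : ∀ a : Int, PySem.Int.floordiv a 100 = a / 100 := fun a => pv_fd a 100 (by norm_num)
  rw [sumOfDoubleEvenPlace_alt]
  simp only [e10, m10, e100]
  simp [h]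

lemma pvO_pos (n : Int) (h : n > 0) :
    pvO n = pvGetDigit (2 * (n % 10)) + sumOfDoubleEvenPlace_alt (n / 10) := by
  unfold pvO
  rw [pv_fd _ _ (by norm_num), pv_md _ _ (by norm_num)]
  simp [h]

lemma pvO_nonpos (n : Int) (h : ¬ n > 0) : pvO n = 0 := by
  unfold pvO; simp [h]

-- one step of B equals the loop entered at odd parity on n / 10
lemma pv_alt_eq_O (n : Int) (h : 0 < n) :
    sumOfDoubleEvenPlace_alt n = pvO (n / 10) := by
  rw [pvAlt_pos n (by omega)]
  by_cases h10 : n / 10 > 0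
  · rw [pvO_pos _ h10]
    rw [pv_getDigit_eq _ (Int.emod_nonneg _ (by norm_num)) (Int.emod_lt_of_pos _ (by norm_num))]
    rw [show n / 10 / 10 = n / 100 by
      rw [Int.ediv_ediv_of_nonneg (by norm_num : (0:Int) ≤ 10)]; norm_num]
  · rw [pvO_nonpos _ h10]
    have h10' : n / 10 = 0 := by omega
    have h100 : n / 100 = 0 := by omega
    rw [h10', h100, pvAlt_nonpos 0 (by omega)]
    norm_num

lemma pvA_main (n : Int) : ∀ s p : Int,
    (PySem.Int.mod p 2 = 0 → pvA_loop n s p = s + sumOfDoubleEvenPlace_alt n) ∧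
    (PySem.Int.mod p 2 = 1 → pvA_loop n s p = s + pvO n) := by
  by_cases h : n > 0
  · intro s p
    have hrec := pvA_main (n / 10)
    have hpar : PySem.Int.mod (p + 1) 2 = 1 - PySem.Int.mod p 2 := by
      rw [pv_md _ _ (by norm_num), pv_md _ _ (by norm_num)]
      omega
    constructor
    · intro hp
      rw [pvA_loop_pos n s p h, hpar, hp, sub_zero,
          if_neg (by norm_num : ¬ (1:Int) = 0)]
      rw [(hrec s (p + 1)).2 (by rw [hpar, hp]; norm_num)]
      rw [pv_alt_eq_O n h]
    · intro hp
      rw [pvA_loop_pos n s p h, hpar, hp, sub_self,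
          if_pos rfl]
      rw [(hrec (s + pvGetDigit (2 * (n % 10))) (p + 1)).1 (by rw [hpar, hp]; norm_num)]
      rw [pvO_pos n h]
      ring
  · intro s p
    constructor <;> intro hp <;>
      rw [pvA_loop_nonpos n s p h]
    · rw [pvAlt_nonpos n (by omega), add_zero]
    · rw [pvO_nonpos n h, add_zero]
termination_by n.toNat
decreasing_by
  all_goals omega

-- ===== VERDICT (by name: the statement is the Claim_ definition above) =====
theorem sumOfDoubleEvenPlace_spec : Claim_equal_sumOfDoubleEvenPlace := by
  intro number _
  unfold Spec_sumOfDoubleEvenPlace sumOfDoubleEvenPlace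
  have := (pvA_main number 0 0).1 (by decide)
  simpa using this
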